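-- pv_equiv track=rewrite | github.com/deborahwatty/gpt_taiwan_braille | moedict_api.py | get_all_segmentations
-- ===== SOURCE A (Python) =====
-- def get_all_segmentations(s):
--     if len(s) == 0:
--         return [[]]
--     if len(s) == 1:
--         return [[s]]
--     result = []
--     for i in range(1, len(s)+1):
--         prefix = s[:i]
--         suffixes = get_all_segmentations(s[i:])
--         for suffix in suffixes:
--             result.append([prefix] + suffix)
--     return sorted(result, key=lambda x: len(x))
-- ===== SOURCE B (Python) =====
-- def get_all_segmentations(s):
--     # Bottom-up DP over suffixes, building segmentations grouped by part count
--     # (rows), so the output comes out already in A's order without any sorting.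
--     n = len(s)
--     groups = [[] for _ in range(n + 1)]  # groups[j] = rows for s[j:]; groups[j][k-1] = segs with k parts
--     for j in range(n - 1, -1, -1):
--         rows = [[[s[j:]]]]
--         for k in range(2, n - j + 1):
--             row = []
--             for i in range(j + 1, n - k + 2):
--                 for seg in groups[i][k - 2]:
--                     row.append([s[j:i]] + seg)
--             rows.append(row)
--         groups[j] = rows
--     if n == 0:
--         return [[]]
--     return [seg for row in groups[0] for seg in row]
-- ===== Notes on version B (the rewrite author's own statement) =====
-- stated objective: alternative
-- what changed: Replaces A's naive recursion (which recomputes every suffix's segmentations from scratch and re-sorts the accumulated result at every level) by a bottom-up dynamic program over suffixes whose segmentations are kept grouped by part count, so the answer is assembled already in A's order with no sort calls and each suffix is processed exactly once.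
import Mathlib
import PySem

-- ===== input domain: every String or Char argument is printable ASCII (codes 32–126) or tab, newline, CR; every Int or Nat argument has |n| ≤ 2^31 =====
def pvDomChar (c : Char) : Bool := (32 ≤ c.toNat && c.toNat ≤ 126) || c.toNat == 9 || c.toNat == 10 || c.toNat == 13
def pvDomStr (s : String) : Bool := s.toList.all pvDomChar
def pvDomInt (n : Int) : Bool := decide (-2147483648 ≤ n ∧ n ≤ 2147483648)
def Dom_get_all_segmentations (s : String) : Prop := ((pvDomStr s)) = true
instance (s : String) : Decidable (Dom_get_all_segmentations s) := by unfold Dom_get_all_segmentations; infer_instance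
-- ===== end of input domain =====

-- B replaces A's naive recursion (which recomputes every suffix's segmentations and
-- re-sorts at every level) by a bottom-up DP over suffixes whose results are kept
-- grouped by part count, so the output is produced already in A's order with no sort.

-- ===== PORT A =====
-- A works on the string; we transliterate over its character list.
-- s[:i] / s[i:] with 0 ≤ i ≤ len(s) are exactly take/drop (exact on this range).
mutual
  -- the function body: base cases, then sort the loop's accumulated result by len
  def segA (cs : List Char) : List (List String) :=
    if cs.length = 0 then [[]]
    else if cs.length = 1 then [[String.mk cs]]
    else PySem.List.sorted (loopA cs 1) (fun x => (x.length : Int)) false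
  termination_by (cs.length, 1, 0)
  decreasing_by exact Prod.Lex.right _ (Prod.Lex.left _ _ (by omega))
  -- 'for i in range(1, len(s)+1): … result.append([prefix] + suffix)'
  def loopA (cs : List Char) (i : Nat) : List (List String) :=
    if _h : 1 ≤ i ∧ i ≤ cs.length then
      ((segA (cs.drop i)).map (fun suf => String.mk (cs.take i) :: suf)) ++ loopA cs (i + 1)
    else []
  termination_by (cs.length, 0, cs.length + 1 - i)
  decreasing_by
    · exact Prod.Lex.left _ _ (by simp; omega)
    · exact Prod.Lex.right _ (Prod.Lex.right _ (by omega))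
end

def get_all_segmentations (s : String) : List (List String) := segA s.toList

-- ===== PORT B =====
-- row for part count k of the suffix s0, read off the table g of the shorter
-- suffixes (g.getD (i-1) [] = rows of s0[i:]): 'for i in range(j+1, n-k+2): …'
def rowB (s0 : List Char) (g : List (List (List (List String)))) (k : Nat) :
    List (List String) :=
  (List.range' 1 (s0.length + 1 - k)).flatMap (fun i =>
    ((g.getD (i - 1) []).getD (k - 2) []).map (fun seg => String.mk (s0.take i) :: seg))

-- 'for j in range(n-1, -1, -1): … groups[j] = rows' — the table, built from the
-- shortest suffix up, entry 0 = rows of the current suffix, grouped by part count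
def tableB : List Char → List (List (List (List String)))
  | [] => [[]]
  | c :: rest =>
    let g := tableB rest
    let s0 := c :: rest
    ([[String.mk s0]] :: (List.range' 2 (s0.length - 1)).map (rowB s0 g)) :: g

def get_all_segmentations_alt (s : String) : List (List String) :=
  let cs := s.toList
  if cs.length = 0 then [[]]
  else ((tableB cs).getD 0 []).flatten

-- ===== PRECONDITION & SPEC =====
def Spec_get_all_segmentations (s : String) (out : List (List String)) : Prop := out = get_all_segmentations_alt s
instance (s : String) (out : List (List String)) : Decidable (Spec_get_all_segmentations s out) := by unfold Spec_get_all_segmentations; infer_instance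

-- ===== CLAIM (what is proved, stated in full; the proofs are below) =====
def Claim_equal_get_all_segmentations : Prop := ∀ (s : String), Dom_get_all_segmentations s → Spec_get_all_segmentations s (get_all_segmentations s)

-- ===== LEMMAS AND PROOFS =====

-- canonical row: the segmentations of cs into exactly k parts, ordered
-- lexicographically by cut positions (first part shortest first)
def R : Nat → List Char → List (List String)
  | 0, _ => []
  | 1, cs => if cs.isEmpty then [] else [[String.mk cs]]
  | (k + 2), cs =>
    (List.range' 1 (cs.length + 1 - (k + 2))).flatMap (fun i =>
      (R (k + 1) (cs.drop i)).map (fun seg => String.mk (cs.take i) :: seg))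

def rowsOf (cs : List Char) : List (List (List String)) :=
  (List.range' 1 cs.length).map (fun k => R k cs)

def rowsFlat (cs : List Char) : List (List String) :=
  (List.range' 1 cs.length).flatMap (fun k => R k cs)

lemma R_eq_nil_of_lt (k : Nat) (cs : List Char) (h : cs.length < k) : R k cs = [] := by
  match k with
  | 0 => rfl
  | 1 =>
    have : cs = [] := by cases cs <;> simp_all
    simp [R, this]
  | (k + 2) =>
    have : cs.length + 1 - (k + 2) = 0 := by omega
    simp [R, this]

lemma length_of_mem_R (k : Nat) : ∀ (cs : List Char) (x : List String), x ∈ R k cs → x.length = k := by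
  induction k with
  | zero => intro cs x hx; simp [R] at hx
  | succ k ih =>
    intro cs x hx
    match k with
    | 0 =>
      simp only [R] at hx
      split at hx <;> simp_all
    | (k + 1) =>
      simp only [R, List.mem_flatMap, List.mem_map] at hx
      obtain ⟨i, _, seg, hseg, rfl⟩ := hx
      simp [ih _ _ hseg]

lemma rowsOf_getD (u : List Char) (j : Nat) : (rowsOf u).getD j [] = R (j + 1) u := by
  unfold rowsOf
  by_cases h : j < u.length
  · rw [List.getD_eq_getElem _ _ (by simpa using h)]
    simp [Nat.add_comm]
  · rw [List.getD_eq_default _ _ (by simpa using h), R_eq_nil_of_lt _ _ (by omega)]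

lemma tails_map_getD (cs : List Char) (p : Nat) :
    (cs.tails.map rowsOf).getD p [] = rowsOf (cs.drop p) := by
  induction cs generalizing p with
  | nil =>
    match p with
    | 0 => simp [rowsOf]
    | (p + 1) => simp [rowsOf]
  | cons c rest ih =>
    match p with
    | 0 => simp
    | (p + 1) => simpa using ih p

lemma rowB_eq (c : Char) (rest : List Char) (ih : tableB rest = rest.tails.map rowsOf)
    (k : Nat) (hk : 2 ≤ k) : rowB (c :: rest) (tableB rest) k = R k (c :: rest) := by
  obtain ⟨k', rfl⟩ : ∃ k', k = k' + 2 := ⟨k - 2, by omega⟩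
  unfold rowB
  rw [ih]
  simp only [R]
  apply List.flatMap_congr
  intro i hi
  obtain ⟨hi1, hi2⟩ := List.mem_range'_1.mp hi
  obtain ⟨t, rfl⟩ : ∃ t, i = t + 1 := ⟨i - 1, by omega⟩
  have h1 : (rest.tails.map rowsOf).getD (t + 1 - 1) [] = rowsOf (rest.drop t) := by
    simpa using tails_map_getD rest t
  rw [h1, show (rest.drop t) = (c :: rest).drop (t + 1) from rfl, rowsOf_getD]
  norm_num

lemma tableB_eq (cs : List Char) : tableB cs = cs.tails.map rowsOf := by
  induction cs with
  | nil => simp [tableB, rowsOf]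
  | cons c rest ih =>
    show ([[String.mk (c :: rest)]] ::
        (List.range' 2 ((c :: rest).length - 1)).map (rowB (c :: rest) (tableB rest))) ::
        tableB rest = _
    rw [List.tails_cons c rest, List.map_cons, ← ih]
    congr 1
    · -- the freshly built rows equal rowsOf (c :: rest)
      have hrows : rowsOf (c :: rest) =
          [[String.mk (c :: rest)]] :: (List.range' 2 rest.length).map (fun k => R k (c :: rest)) := by
        unfold rowsOf
        rw [show (c :: rest).length = rest.length + 1 from rfl, List.range'_succ]
        simp [R]
      rw [hrows, show (c :: rest).length - 1 = rest.length from rfl]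
      congr 1
      apply List.map_congr_left
      intro k hk
      obtain ⟨b1, b2⟩ := List.mem_range'_1.mp hk
      exact rowB_eq c rest ih k b1

-- ---- stable sort characterisation (specialised to key = length) ----

def lenKey (x : List String) : Int := (x.length : Int)

def lenLt (a b : List String) : Bool := decide (lenKey a < lenKey b)

lemma pairwise_insertBy (x : List String) (acc : List (List String))
    (h : acc.Pairwise (fun a b => lenKey a ≤ lenKey b)) :
    (PySem.List.insertBy lenLt x acc).Pairwise (fun a b => lenKey a ≤ lenKey b) := by
  induction acc with
  | nil => simp [PySem.List.insertBy]
  | cons y ys ih =>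
    rw [List.pairwise_cons] at h
    by_cases hb : lenLt x y = true
    · simp only [PySem.List.insertBy, hb, if_pos]
      have hxy : lenKey x ≤ lenKey y := le_of_lt (by simpa [lenLt] using hb)
      refine List.Pairwise.cons ?_ (List.Pairwise.cons h.1 h.2)
      intro z hz
      rcases List.mem_cons.mp hz with rfl | hz
      · exact hxy
      · exact le_trans hxy (h.1 z hz)
    · simp only [PySem.List.insertBy, hb, if_neg, Bool.false_eq_true, not_false_iff]
      refine List.Pairwise.cons ?_ (ih h.2)
      intro z hz
      rcases (PySem.List.mem_insertBy _ _ _ _).mp hz with rfl | hz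
      · have : ¬ lenKey z < lenKey y := by simpa [lenLt] using hb
        omega
      · exact h.1 z hz

lemma filter_insertBy (x : List String) (acc : List (List String)) (v : Int)
    (h : acc.Pairwise (fun a b => lenKey a ≤ lenKey b)) :
    (PySem.List.insertBy lenLt x acc).filter (fun a => decide (lenKey a = v)) =
      acc.filter (fun a => decide (lenKey a = v)) ++ (if lenKey x = v then [x] else []) := by
  induction acc with
  | nil =>
    simp only [PySem.List.insertBy, List.filter_nil, List.nil_append]
    by_cases hv : lenKey x = v <;> simp [hv]
  | cons y ys ih =>
    rw [List.pairwise_cons] at h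
    by_cases hb : lenLt x y = true
    · simp only [PySem.List.insertBy, hb, if_pos]
      have hxy : lenKey x < lenKey y := by simpa [lenLt] using hb
      by_cases hv : lenKey x = v
      · have hnil : (y :: ys).filter (fun a => decide (lenKey a = v)) = [] := by
          apply List.filter_eq_nil_iff.mpr
          intro a ha
          rcases List.mem_cons.mp ha with rfl | ha
          · simp; omega
          · have := h.1 a ha; simp; omega
        rw [List.filter_cons_of_pos (by simp [hv]), hnil, if_pos hv, List.nil_append]
      · rw [List.filter_cons_of_neg (by simp [hv]), if_neg hv, List.append_nil]
    · simp only [PySem.List.insertBy, hb, if_neg, Bool.false_eq_true, not_false_iff]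
      rw [List.filter_cons, List.filter_cons, ih h.2]
      split <;> simp

lemma sorted_foldl_filter (l : List (List String)) (acc : List (List String)) (v : Int)
    (h : acc.Pairwise (fun a b => lenKey a ≤ lenKey b)) :
    (l.foldl (fun acc x => PySem.List.insertBy lenLt x acc) acc).filter
        (fun a => decide (lenKey a = v)) =
      acc.filter (fun a => decide (lenKey a = v)) ++ l.filter (fun a => decide (lenKey a = v)) := by
  induction l generalizing acc with
  | nil => simp
  | cons x l ih =>
    rw [List.foldl_cons, ih _ (pairwise_insertBy x acc h), filter_insertBy x acc v h,
      List.filter_cons]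
    by_cases hv : lenKey x = v
    · simp [hv, List.append_assoc]
    · simp [hv]

lemma filter_sorted (xs : List (List String)) (v : Int) :
    (PySem.List.sorted xs (fun x => (x.length : Int)) false).filter
        (fun a => decide (lenKey a = v)) = xs.filter (fun a => decide (lenKey a = v)) := by
  rw [PySem.List.sorted_eq_foldl_insertBy]
  have h := sorted_foldl_filter xs [] v List.Pairwise.nil
  rw [List.filter_nil, List.nil_append] at h
  exact h

lemma pairwise_filter_ext (ys : List (List String)) : ∀ (zs : List (List String)),
    ys.Pairwise (fun a b => lenKey a ≤ lenKey b) →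
    zs.Pairwise (fun a b => lenKey a ≤ lenKey b) →
    (∀ v : Int, ys.filter (fun a => decide (lenKey a = v)) =
      zs.filter (fun a => decide (lenKey a = v))) →
    ys = zs := by
  induction ys with
  | nil =>
    intro zs _ _ hf
    cases zs with
    | nil => rfl
    | cons b zs' =>
      have h1 := hf (lenKey b)
      rw [List.filter_nil, List.filter_cons_of_pos (by simp)] at h1
      exact absurd h1.symm (List.cons_ne_nil _ _)
  | cons a ys' ih =>
    intro zs hy hz hf
    cases zs with
    | nil =>
      have h1 := hf (lenKey a)
      rw [List.filter_nil, List.filter_cons_of_pos (by simp)] at h1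
      exact absurd h1 (List.cons_ne_nil _ _)
    | cons b zs' =>
      rw [List.pairwise_cons] at hy hz
      have hmem1 : a ∈ b :: zs' := by
        have h1 := hf (lenKey a)
        rw [List.filter_cons_of_pos (by simp)] at h1
        have : a ∈ (b :: zs').filter (fun x => decide (lenKey x = lenKey a)) :=
          h1 ▸ List.mem_cons_self
        exact (List.mem_filter.mp this).1
      have hmem2 : b ∈ a :: ys' := by
        have h2 := (hf (lenKey b)).symm
        rw [List.filter_cons_of_pos (by simp)] at h2
        have : b ∈ (a :: ys').filter (fun x => decide (lenKey x = lenKey b)) :=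
          h2 ▸ List.mem_cons_self
        exact (List.mem_filter.mp this).1
      have hab : lenKey a = lenKey b := by
        have c1 : lenKey b ≤ lenKey a := by
          rcases List.mem_cons.mp hmem1 with rfl | hm
          · rfl
          · exact hz.1 a hm
        have c2 : lenKey a ≤ lenKey b := by
          rcases List.mem_cons.mp hmem2 with rfl | hm
          · rfl
          · exact hy.1 b hm
        omega
      have hae : a = b := by
        have h1 := hf (lenKey a)
        rw [List.filter_cons_of_pos (by simp), List.filter_cons_of_pos (by simp [hab])] at h1
        exact (List.cons.injEq _ _ _ _ ▸ h1).1
      subst hae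
      refine congrArg (List.cons a) (ih zs' hy.2 hz.2 ?_)
      intro v
      by_cases hv : lenKey a = v
      · have h1 := hf v
        rw [List.filter_cons_of_pos (by simp [hv]), List.filter_cons_of_pos (by simp [hv])] at h1
        exact (List.cons.injEq _ _ _ _ ▸ h1).2
      · have h1 := hf v
        rwa [List.filter_cons_of_neg (by simp [hv]), List.filter_cons_of_neg (by simp [hv])] at h1

lemma sorted_eq_of_stable (xs ys : List (List String))
    (hp : ys.Pairwise (fun a b => lenKey a ≤ lenKey b))
    (hf : ∀ v : Int, xs.filter (fun a => decide (lenKey a = v)) =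
      ys.filter (fun a => decide (lenKey a = v))) :
    PySem.List.sorted xs (fun x => (x.length : Int)) false = ys := by
  refine pairwise_filter_ext _ ys ?_ hp ?_
  · exact PySem.List.sorted_pairwise xs (fun x => (x.length : Int))
  · intro v
    rw [filter_sorted]
    exact hf v

lemma filter_R_self (k : Nat) (u : List Char) :
    (R k u).filter (fun x => decide (lenKey x = (k : Int))) = R k u := by
  apply List.filter_eq_self.mpr
  intro x hx
  simp [lenKey, length_of_mem_R k u x hx]

lemma filter_R_ne (k : Nat) (u : List Char) (v : Int) (h : (k : Int) ≠ v) :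
    (R k u).filter (fun x => decide (lenKey x = v)) = [] := by
  apply List.filter_eq_nil_iff.mpr
  intro x hx
  simp only [lenKey, length_of_mem_R k u x hx, decide_eq_true_eq]
  exact h

lemma filter_flatMap_R (m : Nat) : ∀ (a : Nat) (u : List Char) (v : Int),
    ((List.range' a m).flatMap (fun k => R k u)).filter (fun x => decide (lenKey x = v)) =
      if (a : Int) ≤ v ∧ v < (a : Int) + (m : Int) then R v.toNat u else [] := by
  induction m with
  | zero =>
    intro a u v
    rw [if_neg (by omega)]
    simp
  | succ m ih =>
    intro a u v
    rw [List.range'_succ, List.flatMap_cons, List.filter_append, ih (a + 1) u v]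
    by_cases hv : (a : Int) = v
    · have h1 : (R a u).filter (fun x => decide (lenKey x = v)) = R a u := hv ▸ filter_R_self a u
      rw [h1, if_neg (by omega), List.append_nil, if_pos (by push_cast; omega)]
      congr 1
      omega
    · rw [filter_R_ne a u v hv]
      rw [List.nil_append]
      by_cases h2 : ((a : Int) + 1 ≤ v ∧ v < (a : Int) + 1 + (m : Int))
      · rw [if_pos (by push_cast; omega), if_pos (by push_cast; omega)]
      · rw [if_neg (by push_cast at h2 ⊢; omega), if_neg (by push_cast at h2 ⊢; omega)]

lemma pairwise_flatMap_R (m : Nat) : ∀ (a : Nat) (u : List Char),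
    ((List.range' a m).flatMap (fun k => R k u)).Pairwise (fun x y => lenKey x ≤ lenKey y) := by
  induction m with
  | zero => intro a u; simp
  | succ m ih =>
    intro a u
    rw [List.range'_succ, List.flatMap_cons]
    apply List.pairwise_append.mpr
    refine ⟨?_, ih (a + 1) u, ?_⟩
    · apply List.pairwise_of_forall_mem_list
      intro x hx y hy
      simp [lenKey, length_of_mem_R a u x hx, length_of_mem_R a u y hy]
    · intro x hx y hy
      obtain ⟨k, hk, hy⟩ := List.mem_flatMap.mp hy
      obtain ⟨hk1, _⟩ := List.mem_range'_1.mp hk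
      have e1 := length_of_mem_R a u x hx
      have e2 := length_of_mem_R k u y hy
      simp only [lenKey, e1, e2]
      omega

lemma loopA_eq (cs : List Char) (m : Nat) : ∀ (i : Nat), 1 ≤ i → cs.length + 1 - i = m →
    loopA cs i = (List.range' i m).flatMap
      (fun j => (segA (cs.drop j)).map (fun suf => String.mk (cs.take j) :: suf)) := by
  induction m with
  | zero =>
    intro i h1 h2
    rw [loopA, dif_neg (by omega)]
    simp
  | succ m ih =>
    intro i h1 h2
    rw [loopA, dif_pos ⟨h1, by omega⟩, List.range'_succ, List.flatMap_cons]
    congr 1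
    exact ih (i + 1) (by omega) (by omega)

lemma filter_flatMap' {α β : Type} (l : List α) (f : α → List β) (p : β → Bool) :
    (l.flatMap f).filter p = l.flatMap (fun x => (f x).filter p) := by
  induction l with
  | nil => rfl
  | cons x l ih => rw [List.flatMap_cons, List.filter_append, ih, List.flatMap_cons]

lemma segA_eq (N : Nat) : ∀ cs : List Char, cs.length ≤ N →
    segA cs = if cs.length = 0 then [[]] else rowsFlat cs := by
  induction N with
  | zero =>
    intro cs h
    rw [segA, if_pos (by omega), if_pos (by omega)]
  | succ N ih =>
    intro cs hcs
    by_cases h0 : cs.length = 0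
    · rw [segA, if_pos h0, if_pos h0]
    by_cases h1 : cs.length = 1
    · have hne : cs.isEmpty = false := by cases cs <;> simp_all
      rw [segA, if_neg h0, if_pos h1, if_neg h0]
      simp [rowsFlat, h1, List.range'_one, R, hne]
    -- main case: length ≥ 2
    have hn2 : 2 ≤ cs.length := by omega
    rw [segA, if_neg h0, if_neg h1, if_neg h0]
    apply sorted_eq_of_stable
    · exact pairwise_flatMap_R cs.length 1 cs
    · intro v
      rw [loopA_eq cs cs.length 1 le_rfl (by omega)]
      -- middle blocks (first cut j = 1 … n-1) and the last block (j = n, the whole string)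
      have hsplit : List.range' 1 cs.length =
          List.range' 1 (cs.length - 1) ++ [cs.length] := by
        have e1 : cs.length = (cs.length - 1) + 1 := by omega
        conv_lhs => rw [e1]
        rw [List.range'_concat]
        congr 2
        omega
      rw [hsplit, List.flatMap_append, List.filter_append]
      have hlast : (([cs.length] : List Nat).flatMap
          (fun j => (segA (cs.drop j)).map (fun suf => String.mk (cs.take j) :: suf))) =
          [[String.mk cs]] := by
        rw [List.flatMap_cons, List.flatMap_nil, List.drop_length, List.take_length, segA]
        simp
      rw [hlast, filter_flatMap']
      -- closed form of each middle block's filtered contribution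
      have hmid : ∀ j ∈ List.range' 1 (cs.length - 1),
          ((segA (cs.drop j)).map (fun suf => String.mk (cs.take j) :: suf)).filter
              (fun a => decide (lenKey a = v)) =
            ((if (1 : Int) ≤ v - 1 ∧ v - 1 < 1 + ((cs.length - j : Nat) : Int)
              then R (v - 1).toNat (cs.drop j) else []).map
                (fun suf => String.mk (cs.take j) :: suf)) := by
        intro j hj
        obtain ⟨hj1, hj2⟩ := List.mem_range'_1.mp hj
        have hdl : (cs.drop j).length = cs.length - j := List.length_drop
        have hdrop : segA (cs.drop j) = rowsFlat (cs.drop j) := by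
          rw [ih (cs.drop j) (by rw [hdl]; omega), if_neg (by rw [hdl]; omega)]
        rw [hdrop, List.filter_map]
        have hpred : ∀ seg ∈ rowsFlat (cs.drop j),
            ((fun a => decide (lenKey a = v)) ∘ (fun suf => String.mk (cs.take j) :: suf)) seg =
              (fun seg => decide (lenKey seg = v - 1)) seg := by
          intro seg _
          simp only [Function.comp, lenKey, List.length_cons]
          rw [decide_eq_decide]
          push_cast
          omega
        rw [List.filter_congr hpred]
        unfold rowsFlat
        rw [filter_flatMap_R (cs.drop j).length 1 (cs.drop j) (v - 1), hdl]
        norm_num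
      rw [List.flatMap_congr hmid]
      unfold rowsFlat
      rw [filter_flatMap_R cs.length 1 cs v]
      by_cases hv1 : v = 1
      · subst hv1
        rw [if_pos (⟨by norm_num, by push_cast; omega⟩ :
          ((1 : Nat) : Int) ≤ 1 ∧ (1 : Int) < ((1 : Nat) : Int) + (cs.length : Int))]
        have hmidnil : ∀ j ∈ List.range' 1 (cs.length - 1),
            ((if (1 : Int) ≤ (1:Int) - 1 ∧ (1:Int) - 1 < 1 + ((cs.length - j : Nat) : Int)
              then R ((1:Int) - 1).toNat (cs.drop j) else []).map
                (fun suf => String.mk (cs.take j) :: suf)) = [] := by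
          intro j _
          rw [if_neg (by omega)]
          rfl
        rw [List.flatMap_congr hmidnil]
        have hne : cs.isEmpty = false := by cases cs <;> simp_all
        simp [R, hne, lenKey]
      by_cases hv : 2 ≤ v ∧ v ≤ (cs.length : Int)
      · -- the in-range part counts
        obtain ⟨hv2, hvn⟩ := hv
        obtain ⟨k, rfl⟩ : ∃ k : Nat, (k : Int) = v := ⟨v.toNat, by omega⟩
        have hk2 : 2 ≤ k := by exact_mod_cast hv2
        have hkn : k ≤ cs.length := by exact_mod_cast hvn
        have hmid2 : ∀ j ∈ List.range' 1 (cs.length - 1),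
            ((if (1 : Int) ≤ (k : Int) - 1 ∧ (k : Int) - 1 < 1 + ((cs.length - j : Nat) : Int)
              then R ((k : Int) - 1).toNat (cs.drop j) else []).map
                (fun suf => String.mk (cs.take j) :: suf)) =
              (R (k - 1) (cs.drop j)).map (fun suf => String.mk (cs.take j) :: suf) := by
          intro j hj
          obtain ⟨hj1, hj2⟩ := List.mem_range'_1.mp hj
          congr 1
          have hvk : ((k : Int) - 1).toNat = k - 1 := by omega
          by_cases hc : (1 : Int) ≤ (k : Int) - 1 ∧ (k : Int) - 1 < 1 + ((cs.length - j : Nat) : Int)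
          · rw [if_pos hc, hvk]
          · rw [if_neg hc]
            refine (R_eq_nil_of_lt (k - 1) (cs.drop j) ?_).symm
            rw [List.length_drop]
            omega
        rw [List.flatMap_congr hmid2]
        have hlf : ([[String.mk cs]] : List (List String)).filter
            (fun a => decide (lenKey a = (k : Int))) = [] := by
          simp [lenKey]
          omega
        rw [hlf, List.append_nil, if_pos (by push_cast; omega), Int.toNat_natCast]
        -- unfold R at part count k = (k-2)+2
        obtain ⟨k', rfl⟩ : ∃ k', k = k' + 2 := ⟨k - 2, by omega⟩
        rw [show R (k' + 2) cs = (List.range' 1 (cs.length + 1 - (k' + 2))).flatMap (fun i =>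
          (R (k' + 1) (cs.drop i)).map (fun seg => String.mk (cs.take i) :: seg)) from rfl]
        -- pad the short range with empty contributions
        have hrange : List.range' 1 (cs.length - 1) =
            List.range' 1 (cs.length + 1 - (k' + 2)) ++
            List.range' (1 + (cs.length + 1 - (k' + 2))) (k' + 2 - 2) := by
          rw [show cs.length - 1 = (cs.length + 1 - (k' + 2)) + (k' + 2 - 2) from by omega,
            show 1 + (cs.length + 1 - (k' + 2)) = 1 + 1 * (cs.length + 1 - (k' + 2)) from by
              omega, List.range'_append]
        rw [hrange, List.flatMap_append]
        have hpad : (List.range' (1 + (cs.length + 1 - (k' + 2))) (k' + 2 - 2)).flatMap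
            (fun j => (R (k' + 2 - 1) (cs.drop j)).map
              (fun suf => String.mk (cs.take j) :: suf)) = [] := by
          apply List.flatMap_eq_nil_iff.mpr
          intro j hj
          obtain ⟨hj1, _⟩ := List.mem_range'_1.mp hj
          rw [R_eq_nil_of_lt (k' + 2 - 1) (cs.drop j) (by rw [List.length_drop]; omega)]
          rfl
        rw [hpad, List.append_nil]
        apply List.flatMap_congr
        intro i _
        norm_num
      · -- v outside [1, n]: everything filters to nothing
        have hmidnil : ∀ j ∈ List.range' 1 (cs.length - 1),
            ((if (1 : Int) ≤ v - 1 ∧ v - 1 < 1 + ((cs.length - j : Nat) : Int)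
              then R (v - 1).toNat (cs.drop j) else []).map
                (fun suf => String.mk (cs.take j) :: suf)) = [] := by
          intro j hj
          obtain ⟨hj1, hj2⟩ := List.mem_range'_1.mp hj
          rw [if_neg (by omega)]
          rfl
        rw [List.flatMap_congr hmidnil, if_neg (by push_cast; omega)]
        have hlf : ([[String.mk cs]] : List (List String)).filter
            (fun a => decide (lenKey a = v)) = [] := by
          simp [lenKey]
          omega
        rw [hlf]
        simp

lemma rowsFlat_eq_flatten (cs : List Char) : rowsFlat cs = (rowsOf cs).flatten := by
  unfold rowsFlat rowsOf
  rw [List.flatMap_def]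

-- ===== VERDICT (by name: the statement is the Claim_ definition above) =====
theorem get_all_segmentations_spec : Claim_equal_get_all_segmentations := by
  intro s _
  unfold Spec_get_all_segmentations get_all_segmentations get_all_segmentations_alt
  rw [segA_eq s.toList.length s.toList le_rfl]
  show _ = if s.toList.length = 0 then [[]] else ((tableB s.toList).getD 0 []).flatten
  rw [tableB_eq]
  cases h : s.toList with
  | nil => simp
  | cons c rest =>
    rw [if_neg (by simp), if_neg (by simp)]
    rw [List.tails_cons, List.map_cons, List.getD_cons_zero, rowsFlat_eq_flatten]
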